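-- pv_equiv track=rewrite | github.com/kobeomseok95/remind-algorithm | python/programmers/level3/72414.py | get_proper_insert_adv_time
-- ===== SOURCE A (Python) =====
-- def get_proper_insert_adv_time(all_time, play_time, adv_time):
--     adv_start_time, most_view = 0, 0
--     for i in range(adv_time - 1, play_time):
--         if i >= adv_time:
--             if most_view < all_time[i] - all_time[i - adv_time]:
--                 most_view = all_time[i] - all_time[i - adv_time]
--                 adv_start_time = i - adv_time + 1
--         else:
--             if most_view < all_time[i]:
--                 most_view = all_time[i]
--                 adv_start_time = i - adv_time + 1
--     return sec_to_str(adv_start_time)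
--
-- def sec_to_str(second):
--     time = second // 3600
--     second %= 3600
--     minute = second // 60
--     second %= 60
--     return str(time).rjust(2, '0') + ":" + str(minute).rjust(2, '0') + ":" + str(second).rjust(2, '0')
-- ===== SOURCE B (Python) =====
-- def get_proper_insert_adv_time(all_time, play_time, adv_time):
--     def viewed(i):
--         return all_time[i] - (all_time[i - adv_time] if i >= adv_time else 0)
--     # rank every candidate ending index by viewed seconds, best first; Python's
--     # stable sort keeps earlier indices first among equals, matching the
--     # earliest-wins tie-break, and the head is kept only if strictly positive.
--     ranked = sorted(range(adv_time - 1, play_time), key=viewed, reverse=True)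
--     start = ranked[0] - adv_time + 1 if ranked and viewed(ranked[0]) > 0 else 0
--     hours, rest = divmod(start, 3600)
--     minutes, seconds = divmod(rest, 60)
--     return "%02d:%02d:%02d" % (hours, minutes, seconds)
-- ===== Notes on version B (the rewrite author's own statement) =====
-- stated objective: alternative
-- what changed: A's fused single-pass scan carrying (adv_start_time, most_view) through branch updates is replaced by decorate-sort-pick: stable-sort the candidate ending indices by viewed seconds descending (stability keeps the earliest index first among equals), take the head if its viewed seconds are strictly positive, and format with divmod and %02d.
import Mathlib
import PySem

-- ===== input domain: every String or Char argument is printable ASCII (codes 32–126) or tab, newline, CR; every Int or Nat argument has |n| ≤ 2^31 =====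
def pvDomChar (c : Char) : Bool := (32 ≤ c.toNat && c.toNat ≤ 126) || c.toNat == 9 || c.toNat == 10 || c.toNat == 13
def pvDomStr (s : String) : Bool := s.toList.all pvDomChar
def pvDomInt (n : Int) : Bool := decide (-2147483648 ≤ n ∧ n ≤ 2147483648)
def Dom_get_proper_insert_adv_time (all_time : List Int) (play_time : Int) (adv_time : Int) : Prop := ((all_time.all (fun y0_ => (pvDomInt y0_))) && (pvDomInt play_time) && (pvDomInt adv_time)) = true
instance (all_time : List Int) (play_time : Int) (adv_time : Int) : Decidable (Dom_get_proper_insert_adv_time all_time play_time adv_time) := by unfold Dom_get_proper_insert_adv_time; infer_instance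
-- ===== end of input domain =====

-- B replaces A's fused scan (running best + running argmax carried through one loop with two
-- branches) by decorate–sort–pick: stable-sort the candidate ending indices by viewed seconds
-- descending and take the head if strictly positive (objective: alternative; O(n log n) vs O(n)).

-- str(n).rjust(2, '0'), exact: rjust left-pads with the fill char up to width 2
def pyRjust2 (n : Int) : List Char :=
  let cs := PySem.Int.toChars n
  List.replicate (2 - cs.length) '0' ++ cs

-- ===== PORT A =====
def sec_to_str (second : Int) : String :=
  let time := PySem.Int.floordiv second 3600
  let second := PySem.Int.mod second 3600
  let minute := PySem.Int.floordiv second 60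
  let second := PySem.Int.mod second 60
  String.ofList (pyRjust2 time ++ ':' :: (pyRjust2 minute ++ ':' :: pyRjust2 second))

def get_proper_insert_adv_time (all_time : List Int) (play_time : Int) (adv_time : Int) : String :=
  let r := (PySem.List.pyRange (adv_time - 1) play_time 1).foldl
    (fun (st : Int × Int) (i : Int) =>
      if adv_time ≤ i then
        if st.2 < PySem.List.pyGetD all_time i 0 - PySem.List.pyGetD all_time (i - adv_time) 0 then
          (i - adv_time + 1, PySem.List.pyGetD all_time i 0 - PySem.List.pyGetD all_time (i - adv_time) 0)
        else st
      else
        if st.2 < PySem.List.pyGetD all_time i 0 then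
          (i - adv_time + 1, PySem.List.pyGetD all_time i 0)
        else st)
    (0, 0)
  sec_to_str r.1

-- ===== PORT B =====
-- B's "%02d" % n zero-pads to width 2; at width 2 no padded result can carry a sign,
-- so it is exactly pyRjust2 and the port reuses it.
def get_proper_insert_adv_time_alt (all_time : List Int) (play_time : Int) (adv_time : Int) : String :=
  let viewed := fun (i : Int) =>
    PySem.List.pyGetD all_time i 0 -
      (if adv_time ≤ i then PySem.List.pyGetD all_time (i - adv_time) 0 else 0)
  let ranked := PySem.List.sorted (PySem.List.pyRange (adv_time - 1) play_time 1) viewed true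
  let start := match ranked with
    | b :: _ => if 0 < viewed b then b - adv_time + 1 else 0
    | [] => 0
  let hours := PySem.Int.floordiv start 3600
  let rest := PySem.Int.mod start 3600
  let minutes := PySem.Int.floordiv rest 60
  let seconds := PySem.Int.mod rest 60
  String.ofList (pyRjust2 hours ++ ':' :: (pyRjust2 minutes ++ ':' :: pyRjust2 seconds))

-- ===== PRECONDITION & SPEC =====
-- Pre_ excludes exactly the inputs on which Python A raises IndexError: some loop index i
-- (or i - adv_time) falls outside the list; there the ports' pyGetD default is meaningless.
def Pre_get_proper_insert_adv_time (all_time : List Int) (play_time : Int) (adv_time : Int) : Prop :=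
  adv_time - 1 < play_time →
    (-(all_time.length : Int) ≤ adv_time - 1 ∧ play_time - 1 < (all_time.length : Int) ∧
      (adv_time < play_time → play_time - 1 - adv_time < (all_time.length : Int)))
instance (all_time : List Int) (play_time : Int) (adv_time : Int) : Decidable (Pre_get_proper_insert_adv_time all_time play_time adv_time) := by unfold Pre_get_proper_insert_adv_time; infer_instance

def pvWitness_get_proper_insert_adv_time : List Int × Int × Int := ([1, 2, 3, 4, 5], 5, 2)

def Spec_get_proper_insert_adv_time (all_time : List Int) (play_time : Int) (adv_time : Int) (out : String) : Prop := out = get_proper_insert_adv_time_alt all_time play_time adv_time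
instance (all_time : List Int) (play_time : Int) (adv_time : Int) (out : String) : Decidable (Spec_get_proper_insert_adv_time all_time play_time adv_time out) := by unfold Spec_get_proper_insert_adv_time; infer_instance

-- ===== CLAIM (what is proved, stated in full; the proofs are below) =====
def Claim_equal_get_proper_insert_adv_time : Prop := ∀ (all_time : List Int) (play_time : Int) (adv_time : Int), Dom_get_proper_insert_adv_time all_time play_time adv_time → Pre_get_proper_insert_adv_time all_time play_time adv_time → Spec_get_proper_insert_adv_time all_time play_time adv_time (get_proper_insert_adv_time all_time play_time adv_time)

-- ===== LEMMAS AND PROOFS =====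

-- the "viewed seconds for the window ending at i" both programs score by
def pvKey (all_time : List Int) (adv : Int) (i : Int) : Int :=
  PySem.List.pyGetD all_time i 0 -
    (if adv ≤ i then PySem.List.pyGetD all_time (i - adv) 0 else 0)

-- the comparison B's descending stable sort inserts by
def pvBefore (f : Int → Int) (a b : Int) : Bool := decide (f b < f a)

-- Relation between A's fold state (start, most_view) and the head of B's insertion-sort
-- accumulator: the head is the earliest argmax of the processed prefix.
def pvRel (f : Int → Int) (adv : Int) (st : Int × Int) (acc : List Int) : Prop :=
  (acc = [] ∧ st = (0, 0)) ∨
  (∃ b t, acc = b :: t ∧ st.2 = max (f b) 0 ∧ st.1 = if 0 < f b then b - adv + 1 else 0)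

-- inserting into the accumulator updates its head exactly like a strict running max
lemma head_insertBy (f : Int → Int) (i : Int) (acc : List Int) :
    (PySem.List.insertBy (pvBefore f) i acc).head? =
      match acc.head? with
      | none => some i
      | some h => some (if f h < f i then i else h) := by
  cases acc with
  | nil => rfl
  | cons y ys =>
    simp only [PySem.List.insertBy, pvBefore]
    by_cases h : f y < f i
    · simp [h]
    · simp [h]

-- one step preserves the relation
lemma pvRel_step (f : Int → Int) (adv : Int) (st : Int × Int) (acc : List Int) (i : Int)
    (h : pvRel f adv st acc) :
    pvRel f adv (if st.2 < f i then (i - adv + 1, f i) else st)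
      (PySem.List.insertBy (pvBefore f) i acc) := by
  have hh := head_insertBy f i acc
  rcases h with ⟨hacc, hst⟩ | ⟨b, t, hacc, hm, hs⟩
  · subst hacc; subst hst
    right
    refine ⟨i, [], rfl, ?_, ?_⟩
    · by_cases hi : (0 : Int) < f i
      · simp [hi]; omega
      · simp [hi]; omega
    · by_cases hi : (0 : Int) < f i
      · simp [hi]
      · simp [hi]
  · subst hacc
    rw [List.head?_cons] at hh
    obtain ⟨b', t', hacc'⟩ : ∃ b' t', PySem.List.insertBy (pvBefore f) i (b :: t) = b' :: t' := by
      cases hx : PySem.List.insertBy (pvBefore f) i (b :: t) with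
      | nil => rw [hx] at hh; simp at hh
      | cons b' t' => exact ⟨b', t', rfl⟩
    rw [hacc'] at hh
    simp only [List.head?_cons, Option.some.injEq] at hh
    by_cases hfi : f b < f i
    · -- the new element becomes the head
      rw [if_pos hfi] at hh
      rw [hh] at hacc'
      right
      refine ⟨i, t', hacc', ?_, ?_⟩
      · by_cases hup : st.2 < f i
        · simp [hup]; omega
        · simp [hup]; omega
      · by_cases hup : st.2 < f i
        · have h0 : 0 < f i := by have := le_max_right (f b) 0; omega
          simp [hup, h0]
        · -- f i ≤ st.2 = max (f b) 0 and f b < f i force f i ≤ 0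
          simp only [if_neg hup, hs]
          omega
    · -- the head is kept; A cannot update either since f i ≤ f b ≤ st.2
      rw [if_neg hfi] at hh
      rw [hh] at hacc'
      have hno : ¬ st.2 < f i := by
        have := le_max_left (f b) 0; omega
      right
      exact ⟨b, t', hacc', by simpa [hno] using hm, by simpa [hno] using hs⟩

lemma pvRel_foldl (f : Int → Int) (adv : Int) (L : List Int) :
    ∀ (st : Int × Int) (acc : List Int), pvRel f adv st acc →
    pvRel f adv
      (L.foldl (fun st i => if st.2 < f i then (i - adv + 1, f i) else st) st)
      (L.foldl (fun acc i => PySem.List.insertBy (pvBefore f) i acc) acc) := by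
  induction L with
  | nil => intro st acc h; exact h
  | cons x t ih =>
    intro st acc h
    exact ih _ _ (pvRel_step f adv st acc x h)

-- A's two branches collapse to a single strict-update step keyed by pvKey
lemma stepA_eq (all_time : List Int) (adv : Int) (st : Int × Int) (i : Int) :
    (if adv ≤ i then
        if st.2 < PySem.List.pyGetD all_time i 0 - PySem.List.pyGetD all_time (i - adv) 0 then
          (i - adv + 1, PySem.List.pyGetD all_time i 0 - PySem.List.pyGetD all_time (i - adv) 0)
        else st
      else
        if st.2 < PySem.List.pyGetD all_time i 0 then
          (i - adv + 1, PySem.List.pyGetD all_time i 0)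
        else st)
    = (if st.2 < pvKey all_time adv i then (i - adv + 1, pvKey all_time adv i) else st) := by
  unfold pvKey
  by_cases h : adv ≤ i
  · simp [h]
  · simp [h]

-- both start values agree
lemma start_eq (all_time : List Int) (play_time adv : Int) :
    ((PySem.List.pyRange (adv - 1) play_time 1).foldl
      (fun (st : Int × Int) (i : Int) =>
        if adv ≤ i then
          if st.2 < PySem.List.pyGetD all_time i 0 - PySem.List.pyGetD all_time (i - adv) 0 then
            (i - adv + 1, PySem.List.pyGetD all_time i 0 - PySem.List.pyGetD all_time (i - adv) 0)
          else st
        else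
          if st.2 < PySem.List.pyGetD all_time i 0 then
            (i - adv + 1, PySem.List.pyGetD all_time i 0)
          else st)
      (0, 0)).1
    = (match (PySem.List.pyRange (adv - 1) play_time 1).foldl
          (fun acc i => PySem.List.insertBy (pvBefore (pvKey all_time adv)) i acc) [] with
       | b :: _ => if 0 < pvKey all_time adv b then b - adv + 1 else 0
       | [] => 0) := by
  have hfun : (fun (st : Int × Int) (i : Int) =>
      if adv ≤ i then
        if st.2 < PySem.List.pyGetD all_time i 0 - PySem.List.pyGetD all_time (i - adv) 0 then
          (i - adv + 1, PySem.List.pyGetD all_time i 0 - PySem.List.pyGetD all_time (i - adv) 0)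
        else st
      else
        if st.2 < PySem.List.pyGetD all_time i 0 then
          (i - adv + 1, PySem.List.pyGetD all_time i 0)
        else st)
      = fun (st : Int × Int) (i : Int) =>
          if st.2 < pvKey all_time adv i then (i - adv + 1, pvKey all_time adv i) else st := by
    funext st i; exact stepA_eq all_time adv st i
  rw [hfun]
  have := pvRel_foldl (pvKey all_time adv) adv (PySem.List.pyRange (adv - 1) play_time 1)
    (0, 0) [] (Or.inl ⟨rfl, rfl⟩)
  rcases this with ⟨hacc, hst⟩ | ⟨b, t, hacc, hm, hs⟩
  · rw [hacc, hst]
  · rw [hacc, hs]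

-- ===== VERDICT (by name: the statement is the Claim_ definition above) =====
theorem get_proper_insert_adv_time_spec : Claim_equal_get_proper_insert_adv_time := by
  intro all_time play_time adv_time _ _
  unfold Spec_get_proper_insert_adv_time
  unfold get_proper_insert_adv_time get_proper_insert_adv_time_alt
  have hkey : (fun i => PySem.List.pyGetD all_time i 0 -
      (if adv_time ≤ i then PySem.List.pyGetD all_time (i - adv_time) 0 else 0))
      = pvKey all_time adv_time := rfl
  simp only [hkey, PySem.List.sorted_rev_eq_foldl_insertBy]
  rw [start_eq all_time play_time adv_time]
  rfl
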